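-- pv_equiv track=rewrite | github.com/emirdemir8/vetconnect-bitirme | routes/vet.py | _symptom_to_levels_from_list
-- ===== SOURCE A (Python) =====
-- RISK_LEVEL_TERMS: dict[str, set[str]] = {
--     # Seviye 1: Kritik alarm (en ciddi)
--     "level_1": {
--         "death",
--         "death by euthanasia",
--         "digestive tract haemorrhage",
--         "pneumonitis",
--         "hyponatremia",
--     },
--     # Seviye 2: Yüksek risk
--     "level_2": {
--         "dehydration",
--         "blood in faeces",
--         "myopathy",
--         "muscle wasting",
--         "infectious disease nos",
--     },
--     # Seviye 3: Orta derece
--     "level_3": {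
--         "emesis",
--         "diarrhoea",
--         "mucous stool",
--         "hyperhidrosis",
--     },
--     # Seviye 4: Sistemik / operasyonel risk
--     "level_4": {
--         "lack of efficacy",
--         "other abnormal test result",
--     },
--     # Seviye 5: Hafif / lokal
--     "level_5": {
--         "injection site reactions",
--         "lethargy",
--     },
-- }
--
-- def _symptom_to_levels_from_list(symptom: str) -> set[str]:
--     """
--     Kullanıcının girdiği semptom metnini doğrudan risk listeleriyle eşleştir.
--     (Bu, özellikle injection site reactions gibi net terimler için kullanılır.)
--     """
--     s = symptom.strip().lower()
--     levels: set[str] = set()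
--     for level, terms in RISK_LEVEL_TERMS.items():
--         for term in terms:
--             if s == term:
--                 levels.add(level)
--     return levels
-- ===== SOURCE B (Python) =====
-- RISK_LEVEL_TERMS: dict[str, set[str]] = {
--     "level_1": {
--         "death",
--         "death by euthanasia",
--         "digestive tract haemorrhage",
--         "pneumonitis",
--         "hyponatremia",
--     },
--     "level_2": {
--         "dehydration",
--         "blood in faeces",
--         "myopathy",
--         "muscle wasting",
--         "infectious disease nos",
--     },
--     "level_3": {
--         "emesis",
--         "diarrhoea",
--         "mucous stool",
--         "hyperhidrosis",
--     },
--     "level_4": {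
--         "lack of efficacy",
--         "other abnormal test result",
--     },
--     "level_5": {
--         "injection site reactions",
--         "lethargy",
--     },
-- }
--
-- # Flat reverse index built once: term -> its (unique) level.
-- _TERM_TO_LEVEL: dict[str, str] = {
--     term: level for level, terms in RISK_LEVEL_TERMS.items() for term in terms
-- }
--
-- def _symptom_to_levels_from_list(symptom: str) -> set[str]:
--     s = symptom.strip().lower()
--     level = _TERM_TO_LEVEL.get(s)
--     return {level} if level is not None else set()
-- ===== Notes on version B (the rewrite author's own statement) =====
-- stated objective: simpler
-- what changed: Replaced the nested scan over every (level, terms) pair with a module-level precomputed reverse index term->level and a single dict lookup (terms are pairwise disjoint, so a single-level result is exact).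
import Mathlib
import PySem

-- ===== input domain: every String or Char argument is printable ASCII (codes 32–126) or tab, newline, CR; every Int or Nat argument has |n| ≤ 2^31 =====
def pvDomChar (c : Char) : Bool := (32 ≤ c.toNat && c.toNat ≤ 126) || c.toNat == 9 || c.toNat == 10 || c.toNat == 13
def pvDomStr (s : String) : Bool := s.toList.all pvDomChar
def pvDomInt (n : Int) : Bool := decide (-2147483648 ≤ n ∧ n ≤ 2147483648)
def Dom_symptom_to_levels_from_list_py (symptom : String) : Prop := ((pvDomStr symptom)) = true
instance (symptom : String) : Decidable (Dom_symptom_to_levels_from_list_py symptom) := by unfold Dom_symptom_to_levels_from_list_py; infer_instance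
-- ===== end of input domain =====

-- B replaces A's nested scan over all level/term pairs by a single lookup in a precomputed
-- term→level reverse index (objective: simpler; terms are pairwise disjoint, so equal).

-- ===== PORT A =====
def riskLevelTerms : PySem.Dict String (PySem.Set String) := PySem.Dict.ofList [
  ("level_1", PySem.Set.ofList ["death", "death by euthanasia", "digestive tract haemorrhage", "pneumonitis", "hyponatremia"]),
  ("level_2", PySem.Set.ofList ["dehydration", "blood in faeces", "myopathy", "muscle wasting", "infectious disease nos"]),
  ("level_3", PySem.Set.ofList ["emesis", "diarrhoea", "mucous stool", "hyperhidrosis"]),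
  ("level_4", PySem.Set.ofList ["lack of efficacy", "other abnormal test result"]),
  ("level_5", PySem.Set.ofList ["injection site reactions", "lethargy"])]

def symptom_to_levels_from_list_py (symptom : String) : List String :=
  let s := PySem.Str.lower (PySem.Str.strip symptom)
  riskLevelTerms.items.foldl
    (fun levels lt =>
      lt.2.foldl (fun levels term => if s == term then PySem.Set.add levels lt.1 else levels) levels)
    PySem.Set.empty

-- ===== PORT B =====
def termToLevel : PySem.Dict String String := PySem.Dict.ofList [
  ("death", "level_1"),
  ("death by euthanasia", "level_1"),
  ("digestive tract haemorrhage", "level_1"),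
  ("pneumonitis", "level_1"),
  ("hyponatremia", "level_1"),
  ("dehydration", "level_2"),
  ("blood in faeces", "level_2"),
  ("myopathy", "level_2"),
  ("muscle wasting", "level_2"),
  ("infectious disease nos", "level_2"),
  ("emesis", "level_3"),
  ("diarrhoea", "level_3"),
  ("mucous stool", "level_3"),
  ("hyperhidrosis", "level_3"),
  ("lack of efficacy", "level_4"),
  ("other abnormal test result", "level_4"),
  ("injection site reactions", "level_5"),
  ("lethargy", "level_5")]

def symptom_to_levels_from_list_py_alt (symptom : String) : List String :=
  let s := PySem.Str.lower (PySem.Str.strip symptom)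
  match termToLevel.get? s with
  | some level => [level]
  | none => []

-- ===== PRECONDITION & SPEC =====
def Spec_symptom_to_levels_from_list_py (symptom : String) (out : List String) : Prop := out = symptom_to_levels_from_list_py_alt symptom
instance (symptom : String) (out : List String) : Decidable (Spec_symptom_to_levels_from_list_py symptom out) := by unfold Spec_symptom_to_levels_from_list_py; infer_instance

-- ===== CLAIM (what is proved, stated in full; the proofs are below) =====
def Claim_equal_symptom_to_levels_from_list_py : Prop := ∀ (symptom : String), Dom_symptom_to_levels_from_list_py symptom → Spec_symptom_to_levels_from_list_py symptom (symptom_to_levels_from_list_py symptom)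

-- ===== LEMMAS AND PROOFS =====

-- Both programs normalize the input the same way, then depend only on the normalized string s:
-- case analysis on which (if any) of the 23 literal terms s equals.
lemma core_eq (s : String) :
    (riskLevelTerms.items.foldl
      (fun levels lt =>
        lt.2.foldl (fun levels term => if s == term then PySem.Set.add levels lt.1 else levels) levels)
      PySem.Set.empty : List String)
    = (match termToLevel.get? s with
       | some level => [level]
       | none => []) := by
  by_cases h0 : s = "death"
  · subst h0; decide
  by_cases h1 : s = "death by euthanasia"
  · subst h1; decide
  by_cases h2 : s = "digestive tract haemorrhage"
  · subst h2; decide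
  by_cases h3 : s = "pneumonitis"
  · subst h3; decide
  by_cases h4 : s = "hyponatremia"
  · subst h4; decide
  by_cases h5 : s = "dehydration"
  · subst h5; decide
  by_cases h6 : s = "blood in faeces"
  · subst h6; decide
  by_cases h7 : s = "myopathy"
  · subst h7; decide
  by_cases h8 : s = "muscle wasting"
  · subst h8; decide
  by_cases h9 : s = "infectious disease nos"
  · subst h9; decide
  by_cases h10 : s = "emesis"
  · subst h10; decide
  by_cases h11 : s = "diarrhoea"
  · subst h11; decide
  by_cases h12 : s = "mucous stool"
  · subst h12; decide
  by_cases h13 : s = "hyperhidrosis"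
  · subst h13; decide
  by_cases h14 : s = "lack of efficacy"
  · subst h14; decide
  by_cases h15 : s = "other abnormal test result"
  · subst h15; decide
  by_cases h16 : s = "injection site reactions"
  · subst h16; decide
  by_cases h17 : s = "lethargy"
  · subst h17; decide
  have hA : riskLevelTerms = PySem.Dict.mk [("level_1", ["death", "death by euthanasia", "digestive tract haemorrhage", "pneumonitis", "hyponatremia"]), ("level_2", ["dehydration", "blood in faeces", "myopathy", "muscle wasting", "infectious disease nos"]), ("level_3", ["emesis", "diarrhoea", "mucous stool", "hyperhidrosis"]), ("level_4", ["lack of efficacy", "other abnormal test result"]), ("level_5", ["injection site reactions", "lethargy"])] := by rfl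
  have hB : termToLevel = PySem.Dict.mk [("death", "level_1"), ("death by euthanasia", "level_1"), ("digestive tract haemorrhage", "level_1"), ("pneumonitis", "level_1"), ("hyponatremia", "level_1"), ("dehydration", "level_2"), ("blood in faeces", "level_2"), ("myopathy", "level_2"), ("muscle wasting", "level_2"), ("infectious disease nos", "level_2"), ("emesis", "level_3"), ("diarrhoea", "level_3"), ("mucous stool", "level_3"), ("hyperhidrosis", "level_3"), ("lack of efficacy", "level_4"), ("other abnormal test result", "level_4"), ("injection site reactions", "level_5"), ("lethargy", "level_5")] := by rfl
  rw [hA, hB]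
  have g0 : ("death" == s) = false := beq_eq_false_iff_ne.mpr (fun h => h0 h.symm)
  have g1 : ("death by euthanasia" == s) = false := beq_eq_false_iff_ne.mpr (fun h => h1 h.symm)
  have g2 : ("digestive tract haemorrhage" == s) = false := beq_eq_false_iff_ne.mpr (fun h => h2 h.symm)
  have g3 : ("pneumonitis" == s) = false := beq_eq_false_iff_ne.mpr (fun h => h3 h.symm)
  have g4 : ("hyponatremia" == s) = false := beq_eq_false_iff_ne.mpr (fun h => h4 h.symm)
  have g5 : ("dehydration" == s) = false := beq_eq_false_iff_ne.mpr (fun h => h5 h.symm)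
  have g6 : ("blood in faeces" == s) = false := beq_eq_false_iff_ne.mpr (fun h => h6 h.symm)
  have g7 : ("myopathy" == s) = false := beq_eq_false_iff_ne.mpr (fun h => h7 h.symm)
  have g8 : ("muscle wasting" == s) = false := beq_eq_false_iff_ne.mpr (fun h => h8 h.symm)
  have g9 : ("infectious disease nos" == s) = false := beq_eq_false_iff_ne.mpr (fun h => h9 h.symm)
  have g10 : ("emesis" == s) = false := beq_eq_false_iff_ne.mpr (fun h => h10 h.symm)
  have g11 : ("diarrhoea" == s) = false := beq_eq_false_iff_ne.mpr (fun h => h11 h.symm)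
  have g12 : ("mucous stool" == s) = false := beq_eq_false_iff_ne.mpr (fun h => h12 h.symm)
  have g13 : ("hyperhidrosis" == s) = false := beq_eq_false_iff_ne.mpr (fun h => h13 h.symm)
  have g14 : ("lack of efficacy" == s) = false := beq_eq_false_iff_ne.mpr (fun h => h14 h.symm)
  have g15 : ("other abnormal test result" == s) = false := beq_eq_false_iff_ne.mpr (fun h => h15 h.symm)
  have g16 : ("injection site reactions" == s) = false := beq_eq_false_iff_ne.mpr (fun h => h16 h.symm)
  have g17 : ("lethargy" == s) = false := beq_eq_false_iff_ne.mpr (fun h => h17 h.symm)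
  simp [PySem.Dict.get?, PySem.Set.add, List.find?, h0, h1, h2, h3, h4, h5, h6, h7, h8, h9, h10, h11, h12, h13, h14, h15, h16, h17, g0, g1, g2, g3, g4, g5, g6, g7, g8, g9, g10, g11, g12, g13, g14, g15, g16, g17]

-- ===== VERDICT (by name: the statement is the Claim_ definition above) =====
theorem symptom_to_levels_from_list_py_spec : Claim_equal_symptom_to_levels_from_list_py := by
  intro symptom _
  unfold Spec_symptom_to_levels_from_list_py symptom_to_levels_from_list_py symptom_to_levels_from_list_py_alt
  exact core_eq (PySem.Str.lower (PySem.Str.strip symptom))
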